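-- pv_equiv track=rewrite | github.com/tanzeelsaleem/Projects-Assignments | Natural Language Processing/Information Retrieval Systen - Project/bm25Similarity.py | calculaterawfreqdict
-- ===== SOURCE A (Python) =====
-- def calculaterawfreqdict(vocab, tfqueries):
--     rawfreq = {}
--     for term, index in sorted(vocab.items(), key=lambda x: x[1]):
--         termdict = {}
--         for queryid, freqdict in sorted(tfqueries.items()):
--             if index in freqdict:
--                 termfreq = freqdict[index]
--                 termdict[queryid] = termfreq
--         if termdict:
--             rawfreq[index] = termdict
--         termdict = dict(sorted(termdict.items()))
--     rawfreq = dict(sorted(rawfreq.items()))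
--     return rawfreq
-- ===== SOURCE B (Python) =====
-- def calculaterawfreqdict(vocab, tfqueries):
--     indices = set(vocab.values())
--     inv = {}
--     for queryid in sorted(tfqueries):
--         for index, freq in tfqueries[queryid].items():
--             if index in indices:
--                 termdict = inv.get(index, {})
--                 termdict[queryid] = freq
--                 inv[index] = termdict
--     return {index: inv[index] for index in sorted(inv)}
-- ===== Notes on version B (the rewrite author's own statement) =====
-- stated objective: faster
-- what changed: Instead of scanning all queries for every vocabulary index (O(V*Q) membership tests), B makes one pass over the query freqdicts inverting them into index->{queryid:freq} and then sorts the collected keys; Pre_ only requires the assoc lists to have distinct keys, i.e. to actually represent Python dicts, which excludes no Python-representable input.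
import Mathlib
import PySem

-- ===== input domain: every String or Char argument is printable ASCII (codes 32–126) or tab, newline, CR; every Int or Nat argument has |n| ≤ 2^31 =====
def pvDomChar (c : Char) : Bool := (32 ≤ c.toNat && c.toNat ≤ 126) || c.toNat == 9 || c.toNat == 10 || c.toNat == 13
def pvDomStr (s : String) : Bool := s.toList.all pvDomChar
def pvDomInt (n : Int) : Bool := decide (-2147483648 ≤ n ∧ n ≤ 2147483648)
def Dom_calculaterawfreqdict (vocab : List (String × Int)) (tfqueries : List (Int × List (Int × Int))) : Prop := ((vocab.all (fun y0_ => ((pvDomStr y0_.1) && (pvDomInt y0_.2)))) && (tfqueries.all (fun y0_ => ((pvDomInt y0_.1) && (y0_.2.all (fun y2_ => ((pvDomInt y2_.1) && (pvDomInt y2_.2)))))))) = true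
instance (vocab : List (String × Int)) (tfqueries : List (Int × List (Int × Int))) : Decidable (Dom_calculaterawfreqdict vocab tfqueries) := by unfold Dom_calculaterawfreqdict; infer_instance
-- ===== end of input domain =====

-- ===== PORT A =====
-- B inverts the query freqdicts in one pass instead of scanning every query per vocabulary index: asymptotically faster.
-- Port of A. 'sorted(tfqueries.items())' / 'dict(sorted(rawfreq.items()))' are ported as sorts by the first
-- component: exact because the keys are distinct (under Pre_, resp. as Dict keys), so Python's tuple comparison
-- never reaches the (unorderable) dict second components.
def calculaterawfreqdict (vocab : List (String × Int)) (tfqueries : List (Int × List (Int × Int))) : List (Int × List (Int × Int)) :=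
  let sv := PySem.List.sorted vocab (fun x => x.2)
  let sq := PySem.List.sorted tfqueries (fun x => x.1)
  let rawfreq : PySem.Dict Int (PySem.Dict Int Int) :=
    sv.foldl (fun rawfreq ti =>
      let termdict : PySem.Dict Int Int :=
        sq.foldl (fun termdict qf =>
          match (PySem.Dict.mk qf.2).get? ti.2 with
          | some termfreq => termdict.insert qf.1 termfreq
          | none => termdict) PySem.Dict.empty
      if termdict.items ≠ [] then rawfreq.insert ti.2 termdict else rawfreq)
      PySem.Dict.empty
  (PySem.List.sorted rawfreq.items (fun p => p.1)).map (fun p => (p.1, p.2.items))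

-- ===== PORT B =====
-- Port of B (Source B): one pass over the queries in sorted order, inverting into inv : index -> {queryid: freq}.
def calculaterawfreqdict_alt (vocab : List (String × Int)) (tfqueries : List (Int × List (Int × Int))) : List (Int × List (Int × Int)) :=
  let indices : PySem.Set Int := PySem.Set.ofList (vocab.map (fun p => p.2))
  let inv : PySem.Dict Int (PySem.Dict Int Int) :=
    (PySem.List.sorted (tfqueries.map (fun p => p.1)) (fun q => q)).foldl (fun inv q =>
      ((PySem.Dict.mk tfqueries).getD q []).foldl (fun inv p =>
        if indices.contains p.1 then
          inv.insert p.1 ((inv.getD p.1 PySem.Dict.empty).insert q p.2)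
        else inv) inv)
      PySem.Dict.empty
  (PySem.List.sorted inv.keys (fun i => i)).map (fun i => (i, (inv.getD i PySem.Dict.empty).items))

-- ===== PRECONDITION & SPEC =====
-- Pre_ excludes only assoc lists with duplicate keys: those do not represent any Python dict (every Python
-- input has distinct keys), and duplicate query ids would additionally make A's sorted() raise TypeError.
def Pre_calculaterawfreqdict (vocab : List (String × Int)) (tfqueries : List (Int × List (Int × Int))) : Prop :=
  (vocab.map (fun p => p.1)).Nodup ∧ (tfqueries.map (fun p => p.1)).Nodup ∧
    ∀ q ∈ tfqueries, (q.2.map (fun p => p.1)).Nodup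
instance (vocab : List (String × Int)) (tfqueries : List (Int × List (Int × Int))) : Decidable (Pre_calculaterawfreqdict vocab tfqueries) := by unfold Pre_calculaterawfreqdict; infer_instance

def pvWitness_calculaterawfreqdict : (List (String × Int)) × (List (Int × List (Int × Int))) :=
  ([("a", 1), ("b", 2)], [(10, [(1, 3), (5, 4)]), (7, [(2, 6)])])

def Spec_calculaterawfreqdict (vocab : List (String × Int)) (tfqueries : List (Int × List (Int × Int))) (out : List (Int × List (Int × Int))) : Prop := out = calculaterawfreqdict_alt vocab tfqueries
instance (vocab : List (String × Int)) (tfqueries : List (Int × List (Int × Int))) (out : List (Int × List (Int × Int))) : Decidable (Spec_calculaterawfreqdict vocab tfqueries out) := by unfold Spec_calculaterawfreqdict; infer_instance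

-- ===== CLAIM (what is proved, stated in full; the proofs are below) =====
def Claim_equal_calculaterawfreqdict : Prop := ∀ (vocab : List (String × Int)) (tfqueries : List (Int × List (Int × Int))), Dom_calculaterawfreqdict vocab tfqueries → Pre_calculaterawfreqdict vocab tfqueries → Spec_calculaterawfreqdict vocab tfqueries (calculaterawfreqdict vocab tfqueries)

-- ===== LEMMAS AND PROOFS =====

-- `td sq i` is A's inner loop: the termdict collected for index i over the (sorted) query list sq.
def td (sq : List (Int × List (Int × Int))) (i : Int) : PySem.Dict Int Int :=
  sq.foldl (fun termdict qf =>
    match (PySem.Dict.mk qf.2).get? i with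
    | some termfreq => termdict.insert qf.1 termfreq
    | none => termdict) PySem.Dict.empty


def stepA (sq : List (Int × List (Int × Int))) (rawfreq : PySem.Dict Int (PySem.Dict Int Int)) (ti : String × Int) : PySem.Dict Int (PySem.Dict Int Int) :=
  if (td sq ti.2).items ≠ [] then rawfreq.insert ti.2 (td sq ti.2) else rawfreq


def stepB (indices : PySem.Set Int) (q : Int) (inv : PySem.Dict Int (PySem.Dict Int Int)) (p : Int × Int) : PySem.Dict Int (PySem.Dict Int Int) :=
  if indices.contains p.1 then inv.insert p.1 ((inv.getD p.1 PySem.Dict.empty).insert q p.2) else inv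


lemma mk_insert_td (sq : List (Int × List (Int × Int))) (M : List Int) (i : Int) :
    (PySem.Dict.mk (M.map (fun j => (j, td sq j)))).insert i (td sq i)
      = PySem.Dict.mk ((PySem.Set.add M i).map (fun j => (j, td sq j))) := by
  by_cases hm : i ∈ M
  · have hc : (PySem.Dict.mk (M.map (fun j => (j, td sq j)))).contains i = true := by
      rw [PySem.Dict.contains_eq_decide_mem_keys]
      simp [PySem.Dict.keys_mk, List.map_map, Function.comp_def, hm]
    apply PySem.Dict.ext
    rw [PySem.Dict.items_insert_of_contains _ _ hc]
    have hadd : PySem.Set.add M i = M := by simp [PySem.Set.add, PySem.Set.contains, hm]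
    rw [hadd]
    show List.map _ (M.map (fun j => (j, td sq j))) = _
    rw [List.map_map]
    apply List.map_congr_left
    intro j hj
    by_cases hji : j = i <;> simp [hji]
  · have hc : (PySem.Dict.mk (M.map (fun j => (j, td sq j)))).contains i = false := by
      rw [PySem.Dict.contains_eq_decide_mem_keys]
      simp [PySem.Dict.keys_mk, List.map_map, Function.comp_def, hm]
    apply PySem.Dict.ext
    rw [PySem.Dict.items_insert_of_not_contains _ _ hc]
    have hadd : PySem.Set.add M i = M ++ [i] := by simp [PySem.Set.add, PySem.Set.contains, hm]
    rw [hadd]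
    show M.map (fun j => (j, td sq j)) ++ _ = _
    simp


lemma foldA_items (sq : List (Int × List (Int × Int))) (l : List (String × Int)) (M : List Int) :
    (l.foldl (stepA sq) (PySem.Dict.mk (M.map (fun i => (i, td sq i))))).items
      = (PySem.Set.update M ((l.map (fun p => p.2)).filter (fun i => decide ((td sq i).items ≠ [])))).map (fun i => (i, td sq i)) := by
  induction l generalizing M with
  | nil => simp [PySem.Set.update]
  | cons ti rest ih =>
    by_cases hP : (td sq ti.2).items ≠ []
    · have : stepA sq (PySem.Dict.mk (M.map (fun i => (i, td sq i)))) ti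
          = PySem.Dict.mk ((PySem.Set.add M ti.2).map (fun i => (i, td sq i))) := by
        rw [stepA, if_pos hP, mk_insert_td]
      rw [List.foldl_cons, this, ih]
      simp only [List.map_cons, List.filter_cons]
      rw [if_pos (by simpa using hP)]
      rfl
    · have : stepA sq (PySem.Dict.mk (M.map (fun i => (i, td sq i)))) ti
          = PySem.Dict.mk (M.map (fun i => (i, td sq i))) := by
        rw [stepA, if_neg hP]
      rw [List.foldl_cons, this, ih]
      simp only [List.map_cons, List.filter_cons]
      rw [if_neg (by simpa using hP)]

lemma A_closed (vocab : List (String × Int)) (tfqueries : List (Int × List (Int × Int))) :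
    calculaterawfreqdict vocab tfqueries
      = (PySem.List.sorted (PySem.Set.ofList ((((PySem.List.sorted vocab (fun x => x.2)).map (fun p => p.2)).filter (fun i => decide ((td (PySem.List.sorted tfqueries (fun x => x.1)) i).items ≠ []))) : List Int)) (fun i => i)).map
          (fun i => (i, (td (PySem.List.sorted tfqueries (fun x => x.1)) i).items)) := by
  set sq := PySem.List.sorted tfqueries (fun x => x.1) with hsq
  set sv := PySem.List.sorted vocab (fun x => x.2) with hsv
  set S0 : List Int := PySem.Set.ofList ((sv.map (fun p => p.2)).filter (fun i => decide ((td sq i).items ≠ []))) with hS0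
  have hitems : (sv.foldl (stepA sq) PySem.Dict.empty).items = S0.map (fun i => (i, td sq i)) := by
    rw [hS0, PySem.Set.ofList_eq_foldl]
    exact foldA_items sq sv []
  have hbody : calculaterawfreqdict vocab tfqueries
      = (PySem.List.sorted (sv.foldl (stepA sq) PySem.Dict.empty).items (fun p => p.1)).map (fun p => (p.1, p.2.items)) := rfl
  rw [hbody]
  have hsorted : PySem.List.sorted (sv.foldl (stepA sq) PySem.Dict.empty).items (fun p => p.1)
      = (PySem.List.sorted S0 (fun i => i)).map (fun i => (i, td sq i)) := by
    apply PySem.List.sorted_eq_of_perm_of_pairwise_lt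
    · rw [hitems]
      exact (PySem.List.sorted_perm S0 (fun i => i) false).map _
    · rw [List.pairwise_map]
      exact PySem.List.sorted_ofList_pairwise_lt _
  rw [hsorted, List.map_map]
  rfl

-- insert never leaves a dict with empty items
lemma items_insert_ne_nil {κ ν : Type} [BEq κ] (d : PySem.Dict κ ν) (k : κ) (v : ν) :
    (d.insert k v).items ≠ [] := by
  by_cases hc : d.contains k
  · rw [PySem.Dict.items_insert_of_contains _ _ hc]
    intro h
    have : d.items = [] := by simpa using congrArg List.length h
    rw [PySem.Dict.contains] at hc
    simp [this] at hc
  · rw [PySem.Dict.items_insert_of_not_contains _ _ (by simpa using hc)]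
    simp

-- inner fold: keys membership
lemma innerB_mem_keys (indices : PySem.Set Int) (q : Int) (fd : List (Int × Int)) (inv : PySem.Dict Int (PySem.Dict Int Int)) (i : Int) :
    i ∈ (fd.foldl (stepB indices q) inv).keys ↔ i ∈ inv.keys ∨ (i ∈ (indices : List Int) ∧ i ∈ fd.map (fun p => p.1)) := by
  induction fd generalizing inv with
  | nil => simp
  | cons p rest ih =>
    rw [List.foldl_cons, ih]
    by_cases hc : indices.contains p.1
    · rw [stepB, if_pos hc]
      rw [PySem.Set.contains_iff] at hc
      by_cases hpi : i = p.1
      · subst hpi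
        simp [PySem.Dict.mem_keys_insert, hc]
      · simp only [PySem.Dict.mem_keys_insert, List.map_cons, List.mem_cons, hpi]
        tauto
    · rw [stepB, if_neg hc]
      rw [PySem.Set.contains_iff] at hc
      by_cases hpi : i = p.1
      · subst hpi; simp [hc]
      · simp only [List.map_cons, List.mem_cons, hpi]
        tauto

-- inner fold: keys stay nodup
lemma innerB_nodup_keys (indices : PySem.Set Int) (q : Int) (fd : List (Int × Int)) (inv : PySem.Dict Int (PySem.Dict Int Int))
    (h : inv.keys.Nodup) : (fd.foldl (stepB indices q) inv).keys.Nodup := by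
  induction fd generalizing inv with
  | nil => exact h
  | cons p rest ih =>
    rw [List.foldl_cons]
    apply ih
    rw [stepB]
    split
    · exact PySem.Dict.nodup_keys_insert _ _ _ h
    · exact h

-- inner fold leaves getD at i untouched when i is filtered out or absent
lemma innerB_getD_miss (indices : PySem.Set Int) (q : Int) (fd : List (Int × Int)) (inv : PySem.Dict Int (PySem.Dict Int Int)) (i : Int)
    (h : i ∉ (indices : List Int) ∨ i ∉ fd.map (fun p => p.1)) :
    (fd.foldl (stepB indices q) inv).getD i PySem.Dict.empty = inv.getD i PySem.Dict.empty := by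
  induction fd generalizing inv with
  | nil => rfl
  | cons p rest ih =>
    rw [List.foldl_cons]
    have hrest : (rest.foldl (stepB indices q) (stepB indices q inv p)).getD i PySem.Dict.empty
        = (stepB indices q inv p).getD i PySem.Dict.empty := by
      apply ih
      rcases h with h | h
      · exact Or.inl h
      · exact Or.inr (fun hm => h (by simp at hm ⊢; tauto))
    rw [hrest, stepB]
    split
    · rename_i hc
      rcases h with h | h
      · have hpi : p.1 ≠ i := by
          intro he; exact h (by rw [← he]; exact (PySem.Set.contains_iff _ _).mp hc)
        rw [PySem.Dict.getD_insert_of_ne _ _ _ (Ne.symm hpi)]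
      · have hpi : p.1 ≠ i := by
          intro he; exact h (by simp [← he])
        rw [PySem.Dict.getD_insert_of_ne _ _ _ (Ne.symm hpi)]
    · rfl

-- inner fold: the one hit inserts (q, f) into the dict at i
lemma innerB_getD_hit (indices : PySem.Set Int) (q : Int) (fd : List (Int × Int)) (inv : PySem.Dict Int (PySem.Dict Int Int)) (i : Int) (f : Int)
    (hnd : (fd.map (fun p => p.1)).Nodup) (hc : i ∈ (indices : List Int))
    (hget : (PySem.Dict.mk fd).get? i = some f) :
    (fd.foldl (stepB indices q) inv).getD i PySem.Dict.empty = (inv.getD i PySem.Dict.empty).insert q f := by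
  induction fd generalizing inv with
  | nil =>
    rw [show (PySem.Dict.mk ([] : List (Int × Int))) = PySem.Dict.empty from rfl, PySem.Dict.get?_empty] at hget
    cases hget
  | cons p rest ih =>
    rw [List.foldl_cons]
    rw [PySem.Dict.get?_mk_cons] at hget
    by_cases hpi : p.1 = i
    · rw [if_pos (by simpa using hpi)] at hget
      injection hget with hf
      have hni : i ∉ rest.map (fun p => p.1) := by
        rw [List.map_cons] at hnd
        rw [← hpi]; exact (List.nodup_cons.mp hnd).1
      rw [innerB_getD_miss indices q rest _ i (Or.inr hni), stepB,
        if_pos ((PySem.Set.contains_iff _ _).mpr (by rwa [hpi]))]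
      rw [hpi, hf, PySem.Dict.getD_insert_self]
    · rw [if_neg (by simpa using hpi)] at hget
      have : (stepB indices q inv p).getD i PySem.Dict.empty = inv.getD i PySem.Dict.empty := by
        rw [stepB]; split
        · rw [PySem.Dict.getD_insert_of_ne _ _ _ (Ne.symm hpi)]
        · rfl
      rw [ih _ (by rw [List.map_cons] at hnd; exact (List.nodup_cons.mp hnd).2) hget, this]

def stepQ (indices : PySem.Set Int) (inv : PySem.Dict Int (PySem.Dict Int Int)) (qf : Int × List (Int × Int)) : PySem.Dict Int (PySem.Dict Int Int) :=
  qf.2.foldl (stepB indices qf.1) inv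

lemma get?_mk_none_iff (fd : List (Int × Int)) (i : Int) :
    (PySem.Dict.mk fd).get? i = none ↔ i ∉ fd.map (fun p => p.1) := by
  rw [PySem.Dict.get?_eq_none_iff_not_mem_keys, PySem.Dict.keys_mk]

lemma bigB_getD (indices : PySem.Set Int) (i : Int) (l : List (Int × List (Int × Int))) (inv : PySem.Dict Int (PySem.Dict Int Int))
    (hnd : ∀ qf ∈ l, (qf.2.map (fun p => p.1)).Nodup) (hc : i ∈ (indices : List Int)) :
    (l.foldl (stepQ indices) inv).getD i PySem.Dict.empty
      = l.foldl (fun t qf => match (PySem.Dict.mk qf.2).get? i with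
          | some f => t.insert qf.1 f
          | none => t) (inv.getD i PySem.Dict.empty) := by
  induction l generalizing inv with
  | nil => rfl
  | cons qf rest ih =>
    rw [List.foldl_cons, List.foldl_cons, ih _ (fun x hx => hnd x (List.mem_cons_of_mem _ hx))]
    congr 1
    rcases hg : (PySem.Dict.mk qf.2).get? i with _ | f
    · exact innerB_getD_miss indices qf.1 qf.2 inv i (Or.inr ((get?_mk_none_iff qf.2 i).mp hg))
    · exact innerB_getD_hit indices qf.1 qf.2 inv i f (hnd qf (List.mem_cons_self)) hc hg

lemma bigB_mem_keys (indices : PySem.Set Int) (i : Int) (l : List (Int × List (Int × Int))) (inv : PySem.Dict Int (PySem.Dict Int Int)) :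
    i ∈ (l.foldl (stepQ indices) inv).keys ↔ i ∈ inv.keys ∨ (i ∈ (indices : List Int) ∧ ∃ qf ∈ l, i ∈ qf.2.map (fun p => p.1)) := by
  induction l generalizing inv with
  | nil => simp
  | cons qf rest ih =>
    rw [List.foldl_cons, ih, stepQ, innerB_mem_keys]
    simp only [List.mem_cons]
    constructor
    · rintro ((h | ⟨h1, h2⟩) | ⟨h1, qf', h2, h3⟩)
      · exact Or.inl h
      · exact Or.inr ⟨h1, qf, Or.inl rfl, h2⟩
      · exact Or.inr ⟨h1, qf', Or.inr h2, h3⟩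
    · rintro (h | ⟨h1, qf', (rfl | h2), h3⟩)
      · exact Or.inl (Or.inl h)
      · exact Or.inl (Or.inr ⟨h1, h3⟩)
      · exact Or.inr ⟨h1, qf', h2, h3⟩

lemma bigB_nodup_keys (indices : PySem.Set Int) (l : List (Int × List (Int × Int))) (inv : PySem.Dict Int (PySem.Dict Int Int))
    (h : inv.keys.Nodup) : (l.foldl (stepQ indices) inv).keys.Nodup := by
  induction l generalizing inv with
  | nil => exact h
  | cons qf rest ih => exact ih _ (innerB_nodup_keys _ _ _ _ h)

lemma td_items_eq_nil_iff (i : Int) (l : List (Int × List (Int × Int))) (t0 : PySem.Dict Int Int) :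
    ((l.foldl (fun t qf => match (PySem.Dict.mk qf.2).get? i with
        | some f => t.insert qf.1 f
        | none => t) t0).items = []) ↔ (t0.items = [] ∧ ∀ qf ∈ l, (PySem.Dict.mk qf.2).get? i = none) := by
  induction l generalizing t0 with
  | nil => simp
  | cons qf rest ih =>
    rw [List.foldl_cons]
    rcases hg : (PySem.Dict.mk qf.2).get? i with _ | f
    · simp only [ih]
      constructor
      · rintro ⟨h1, h2⟩
        exact ⟨h1, fun x hx => by rcases List.mem_cons.mp hx with rfl | hx'; exacts [hg, h2 x hx']⟩
      · rintro ⟨h1, h2⟩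
        exact ⟨h1, fun x hx => h2 x (List.mem_cons_of_mem _ hx)⟩
    · simp only [ih]
      constructor
      · rintro ⟨h1, _⟩
        exact absurd h1 (items_insert_ne_nil _ _ _)
      · rintro ⟨_, h2⟩
        exact absurd (h2 qf List.mem_cons_self) (by simp [hg])


lemma sorted_keys_eq (tfqueries : List (Int × List (Int × Int))) (h : (tfqueries.map (fun p => p.1)).Nodup) :
    PySem.List.sorted (tfqueries.map (fun p => p.1)) (fun q => q)
      = (PySem.List.sorted tfqueries (fun x => x.1)).map (fun p => p.1) := by
  apply PySem.List.sorted_eq_of_perm_of_pairwise_lt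
  · exact (PySem.List.sorted_perm tfqueries (fun x => x.1) false).map _
  · have hle : ((PySem.List.sorted tfqueries (fun x => x.1)).map (fun p => p.1)).Pairwise (· ≤ ·) :=
      PySem.List.sorted_map_key_pairwise _ _
    have hnd : ((PySem.List.sorted tfqueries (fun x => x.1)).map (fun p => p.1)).Nodup :=
      (((PySem.List.sorted_perm tfqueries (fun x => x.1) false).map (fun p => p.1)).nodup_iff).mpr h
    have hne : ((PySem.List.sorted tfqueries (fun x => x.1)).map (fun p => p.1)).Pairwise (· ≠ ·) :=
      List.Pairwise.imp (fun h => h) hnd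
    exact (hle.and hne).imp (fun ⟨h1, h2⟩ => lt_of_le_of_ne h1 h2)


lemma B_closed (vocab : List (String × Int)) (tfqueries : List (Int × List (Int × Int)))
    (h : Pre_calculaterawfreqdict vocab tfqueries) :
    calculaterawfreqdict_alt vocab tfqueries
      = (PySem.List.sorted (PySem.Set.ofList (((vocab.map (fun p => p.2)).filter (fun i => decide ((td (PySem.List.sorted tfqueries (fun x => x.1)) i).items ≠ []))) : List Int)) (fun i => i)).map
          (fun i => (i, (td (PySem.List.sorted tfqueries (fun x => x.1)) i).items)) := by
  obtain ⟨-, hndq, hndf⟩ := h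
  simp only [calculaterawfreqdict_alt]
  set sq := PySem.List.sorted tfqueries (fun x => x.1) with hsq
  set indices : PySem.Set Int := PySem.Set.ofList (vocab.map (fun p => p.2)) with hind
  have hndf' : ∀ qf ∈ sq, (qf.2.map (fun p => p.1)).Nodup := by
    intro qf hqf; exact hndf qf ((PySem.List.mem_sorted _ _ _ _).mp hqf)
  rw [show (fun (inv : PySem.Dict Int (PySem.Dict Int Int)) (q : Int) =>
        ((PySem.Dict.mk tfqueries).getD q []).foldl (fun inv p =>
          if indices.contains p.1 then
            inv.insert p.1 ((inv.getD p.1 PySem.Dict.empty).insert q p.2)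
          else inv) inv)
      = (fun (inv : PySem.Dict Int (PySem.Dict Int Int)) (q : Int) =>
        ((PySem.Dict.mk tfqueries).getD q []).foldl (stepB indices q) inv) from rfl]
  have hinv : (PySem.List.sorted (tfqueries.map (fun p => p.1)) (fun q => q)).foldl (fun inv q =>
        ((PySem.Dict.mk tfqueries).getD q []).foldl (stepB indices q) inv) PySem.Dict.empty
      = sq.foldl (stepQ indices) PySem.Dict.empty := by
    rw [sorted_keys_eq tfqueries hndq, ← hsq, List.foldl_map]
    apply PySem.List.foldl_congr_mem
    intro acc qf hqf
    have hmem : (qf.1, qf.2) ∈ (PySem.Dict.mk tfqueries).items := (PySem.List.mem_sorted _ _ _ _).mp hqf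
    have : (PySem.Dict.mk tfqueries).getD qf.1 [] = qf.2 :=
      PySem.Dict.getD_of_mem_items _ hmem (by rw [PySem.Dict.keys_mk]; exact hndq) _
    rw [this, stepQ]
  rw [hinv]
  set inv := sq.foldl (stepQ indices) PySem.Dict.empty with hinvd
  have hmemk : ∀ i : Int, i ∈ inv.keys ↔ (i ∈ (indices : List Int) ∧ ∃ qf ∈ sq, i ∈ qf.2.map (fun p => p.1)) := by
    intro i
    rw [hinvd, bigB_mem_keys]
    simp [PySem.Dict.keys_empty]
  have hgetD : ∀ i ∈ inv.keys, (inv.getD i PySem.Dict.empty).items = (td sq i).items := by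
    intro i hi
    rw [hinvd, bigB_getD indices i sq PySem.Dict.empty hndf' ((hmemk i).mp hi).1]
    rfl
  have h2 : ∀ i : Int, ((td sq i).items ≠ []) ↔ ∃ qf ∈ sq, i ∈ qf.2.map (fun p => p.1) := by
    intro i
    rw [Ne, td, td_items_eq_nil_iff]
    constructor
    · intro hcontr
      by_contra hno
      push Not at hno
      exact hcontr ⟨rfl, fun qf hqf => (get?_mk_none_iff qf.2 i).mpr (hno qf hqf)⟩
    · rintro ⟨qf, hqf, hif⟩ ⟨_, hall⟩
      exact (get?_mk_none_iff qf.2 i).mp (hall qf hqf) hif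
  have hkeys_sorted : PySem.List.sorted inv.keys (fun i => i)
      = PySem.List.sorted (PySem.Set.ofList (((vocab.map (fun p => p.2)).filter (fun i => decide ((td sq i).items ≠ []))) : List Int)) (fun i => i) := by
    apply PySem.List.sorted_eq_sorted_of_perm _ _ _ (fun a b h => h)
    rw [List.perm_ext_iff_of_nodup (bigB_nodup_keys _ _ _ (by simp [PySem.Dict.keys_empty])) (PySem.Set.nodup_ofList _)]
    intro i
    rw [hmemk i]
    have h3 : i ∈ PySem.Set.ofList ((vocab.map (fun p => p.2)).filter (fun i => decide ((td sq i).items ≠ [])))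
        ↔ i ∈ vocab.map (fun p => p.2) ∧ ((td sq i).items ≠ []) := by
      rw [PySem.Set.mem_ofList, List.mem_filter, decide_eq_true_eq]
    rw [h3, h2 i, hind, PySem.Set.mem_ofList]
  rw [hkeys_sorted]
  apply List.map_congr_left
  intro i hi
  have hik : i ∈ inv.keys := by
    have : i ∈ PySem.List.sorted inv.keys (fun i => i) := by rw [hkeys_sorted]; exact hi
    exact (PySem.List.mem_sorted _ _ _ _).mp this
  rw [hgetD i hik]

lemma glue (vocab : List (String × Int)) (tfqueries : List (Int × List (Int × Int))) :
    PySem.List.sorted (PySem.Set.ofList ((((PySem.List.sorted vocab (fun x => x.2)).map (fun p => p.2)).filter (fun i => decide ((td (PySem.List.sorted tfqueries (fun x => x.1)) i).items ≠ []))) : List Int)) (fun i => i)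
      = PySem.List.sorted (PySem.Set.ofList (((vocab.map (fun p => p.2)).filter (fun i => decide ((td (PySem.List.sorted tfqueries (fun x => x.1)) i).items ≠ []))) : List Int)) (fun i => i) := by
  apply PySem.List.sorted_eq_sorted_of_perm _ _ _ (fun a b h => h)
  rw [List.perm_ext_iff_of_nodup (PySem.Set.nodup_ofList _) (PySem.Set.nodup_ofList _)]
  intro a
  simp [PySem.Set.mem_ofList, List.mem_filter, PySem.List.mem_sorted]

-- ===== VERDICT (by name: the statement is the Claim_ definition above) =====
theorem calculaterawfreqdict_spec : Claim_equal_calculaterawfreqdict := by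
  intro vocab tfqueries _hDom hPre
  unfold Spec_calculaterawfreqdict
  rw [A_closed, B_closed vocab tfqueries hPre, glue]
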